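-- pv_equiv track=rewrite | github.com/KristhelCordero/LabMatrices | funciones.py | calDisponiblesyOcupados
-- ===== SOURCE A (Python) =====
-- def calDisponiblesyOcupados(pmat):
--     '''
--     Funcionalidad: Realiza el cálculo de los locales que se encuentran disponibles y ocupados
--     Entradas:
--     - pmat(list): matriz con los datos de los alquileres
--     Salidas:
--     - [cantDisponibles,cantOcupados](list): Lista con la cantidad de locales disponibles y desocupados
--     '''
--     cantDisponibles=0
--     cantOcupados=0
--     for f in range(len(pmat)):
--         for c in range(len(pmat[f])):
--             if pmat[f][c]==0:
--                 cantDisponibles+=1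
--             else:
--                 cantOcupados+=1
--     return [cantDisponibles,cantOcupados]
-- ===== SOURCE B (Python) =====
-- def calDisponiblesyOcupados(pmat):
--     if not pmat:
--         return [0, 0]
--     disponibles, ocupados = calDisponiblesyOcupados(pmat[1:])
--     z = pmat[0].count(0)
--     return [disponibles + z, ocupados + len(pmat[0]) - z]
-- ===== Notes on version B (the rewrite author's own statement) =====
-- stated objective: alternative
-- what changed: B recurses on the list of rows (combining each row via list.count(0) and a length subtraction with the recursive result for the remaining rows) instead of A's nested index loops with two branch-updated counters.
import Mathlib
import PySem

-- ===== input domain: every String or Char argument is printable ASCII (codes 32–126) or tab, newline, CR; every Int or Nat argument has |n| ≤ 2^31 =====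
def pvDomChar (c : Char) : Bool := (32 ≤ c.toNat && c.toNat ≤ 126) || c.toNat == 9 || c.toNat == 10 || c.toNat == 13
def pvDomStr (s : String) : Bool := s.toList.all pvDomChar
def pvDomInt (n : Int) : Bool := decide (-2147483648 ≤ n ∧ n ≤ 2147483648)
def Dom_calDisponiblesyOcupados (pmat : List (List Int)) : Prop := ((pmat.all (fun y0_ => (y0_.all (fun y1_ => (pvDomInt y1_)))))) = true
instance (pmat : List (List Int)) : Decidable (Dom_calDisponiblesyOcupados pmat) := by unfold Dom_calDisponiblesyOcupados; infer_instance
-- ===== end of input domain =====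

-- B replaces A's nested index loops with recursion on the list of rows, combining
-- each row via list.count(0) and a length subtraction (objective: alternative).

-- ===== PORT A =====
-- A: for f in range(len(pmat)): for c in range(len(pmat[f])): branch on pmat[f][c]==0,
-- incrementing one of two counters. Indices are always in range, so the getD defaults are never used.
def calDisponiblesyOcupados (pmat : List (List Int)) : List Int :=
  let p := (List.range pmat.length).foldl
    (fun (acc : Int × Int) f =>
      let row := pmat.getD f []
      (List.range row.length).foldl
        (fun (acc2 : Int × Int) c =>
          if row.getD c 0 == 0 then (acc2.1 + 1, acc2.2) else (acc2.1, acc2.2 + 1))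
        acc)
    (0, 0)
  [p.1, p.2]

-- ===== PORT B =====
-- B: recursion on the rows; base case [0,0]; combine the recursive result for the
-- tail with the head row's zero count (list.count(0)) and its length.
def calDisponiblesyOcupados_alt : List (List Int) → List Int
  | [] => [0, 0]
  | row :: rest =>
    let r := calDisponiblesyOcupados_alt rest
    let disponibles := r.getD 0 0
    let ocupados := r.getD 1 0
    let z : Int := PySem.List.count row 0
    [disponibles + z, ocupados + (row.length : Int) - z]

-- ===== PRECONDITION & SPEC =====
def Spec_calDisponiblesyOcupados (pmat : List (List Int)) (out : List Int) : Prop := out = calDisponiblesyOcupados_alt pmat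
instance (pmat : List (List Int)) (out : List Int) : Decidable (Spec_calDisponiblesyOcupados pmat out) := by unfold Spec_calDisponiblesyOcupados; infer_instance

-- ===== CLAIM =====
def Claim_equal_calDisponiblesyOcupados : Prop := ∀ (pmat : List (List Int)), Dom_calDisponiblesyOcupados pmat → Spec_calDisponiblesyOcupados pmat (calDisponiblesyOcupados pmat)

-- ===== LEMMAS AND PROOFS =====

-- A's inner loop adds (#zeros of row, #nonzeros of row) to the accumulator.
theorem pv_inner (row : List Int) (acc : Int × Int) :
    (List.range row.length).foldl
      (fun (acc2 : Int × Int) c =>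
        if row.getD c 0 == 0 then (acc2.1 + 1, acc2.2) else (acc2.1, acc2.2 + 1))
      acc
    = (acc.1 + (row.count 0 : Int),
       acc.2 + ((row.length : Int) - (row.count 0 : Int))) := by
  induction row generalizing acc with
  | nil => simp
  | cons x xs ih =>
    rw [List.length_cons, List.range_succ_eq_map, List.foldl_cons, List.foldl_map]
    rw [PySem.List.foldl_congr_mem _ _
      (fun (acc2 : Int × Int) c =>
        if xs.getD c 0 == 0 then (acc2.1 + 1, acc2.2) else (acc2.1, acc2.2 + 1)) _
      (by intro a c _; simp [List.getD])]
    rw [ih]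
    by_cases hx : x = 0 <;> simp [hx, List.getD] <;> ring

-- A's outer loop equals B's recursion on the rows.
theorem pv_outer (pmat : List (List Int)) (acc : Int × Int) :
    (List.range pmat.length).foldl
      (fun (acc : Int × Int) f =>
        let row := pmat.getD f []
        (List.range row.length).foldl
          (fun (acc2 : Int × Int) c =>
            if row.getD c 0 == 0 then (acc2.1 + 1, acc2.2) else (acc2.1, acc2.2 + 1))
          acc)
      acc
    = (acc.1 + (calDisponiblesyOcupados_alt pmat).getD 0 0,
       acc.2 + (calDisponiblesyOcupados_alt pmat).getD 1 0) := by
  induction pmat generalizing acc with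
  | nil => simp [calDisponiblesyOcupados_alt]
  | cons r rs ih =>
    rw [List.length_cons, List.range_succ_eq_map, List.foldl_cons, List.foldl_map]
    rw [PySem.List.foldl_congr_mem _ _
      (fun (acc : Int × Int) f =>
        (List.range (rs.getD f []).length).foldl
          (fun (acc2 : Int × Int) c =>
            if (rs.getD f []).getD c 0 == 0 then (acc2.1 + 1, acc2.2) else (acc2.1, acc2.2 + 1))
          acc) _
      (by intro a f _; simp [List.getD])]
    rw [ih]
    have hr : ((r :: rs).getD 0 []) = r := by simp [List.getD]
    simp only [hr] at *
    rw [pv_inner]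
    simp [calDisponiblesyOcupados_alt, PySem.List.count_eq, List.getD]
    constructor <;> ring

-- ===== VERDICT =====
theorem calDisponiblesyOcupados_spec : Claim_equal_calDisponiblesyOcupados := by
  intro pmat _
  unfold Spec_calDisponiblesyOcupados calDisponiblesyOcupados
  rw [pv_outer]
  cases pmat with
  | nil => simp [calDisponiblesyOcupados_alt]
  | cons r rs =>
    simp only [calDisponiblesyOcupados_alt]
    simp [List.getD]
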